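-- pv_equiv track=rewrite | github.com/adhamidris/sandnsky | web/migrations/0037_package_trip_category.py | _count_package_destinations
-- ===== SOURCE A (Python) =====
-- PACKAGE_DESTINATION_EQUIVALENCE_GROUPS = [
--     frozenset({"White & Black Desert", "Bahareya Oasis"}),
--     frozenset({"Cairo", "Giza"}),
-- ]
--
-- def _count_package_destinations(names):
--     remaining = {name for name in names if name}
--     count = 0
--     for group in PACKAGE_DESTINATION_EQUIVALENCE_GROUPS:
--         if remaining & group:
--             count += 1
--             remaining -= group
--     count += len(remaining)
--     return count
-- ===== SOURCE B (Python) =====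
-- # Each equivalent-destination group is collapsed to one canonical representative;
-- # counting destinations is then just counting distinct canonical keys.
-- _CANON = {
--     "White & Black Desert": "White & Black Desert",
--     "Bahareya Oasis": "White & Black Desert",
--     "Cairo": "Cairo",
--     "Giza": "Cairo",
-- }
--
-- def _count_package_destinations(names):
--     return len({_CANON.get(name, name) for name in names if name})
-- ===== Notes on version B (the rewrite author's own statement) =====
-- stated objective: simpler
-- what changed: Replaces A's loop that intersects and subtracts each equivalence group from a 'remaining' set by a constant name-to-canonical-representative table: each non-empty name is mapped to its canonical key and the distinct keys are counted in one set comprehension.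
import Mathlib
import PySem

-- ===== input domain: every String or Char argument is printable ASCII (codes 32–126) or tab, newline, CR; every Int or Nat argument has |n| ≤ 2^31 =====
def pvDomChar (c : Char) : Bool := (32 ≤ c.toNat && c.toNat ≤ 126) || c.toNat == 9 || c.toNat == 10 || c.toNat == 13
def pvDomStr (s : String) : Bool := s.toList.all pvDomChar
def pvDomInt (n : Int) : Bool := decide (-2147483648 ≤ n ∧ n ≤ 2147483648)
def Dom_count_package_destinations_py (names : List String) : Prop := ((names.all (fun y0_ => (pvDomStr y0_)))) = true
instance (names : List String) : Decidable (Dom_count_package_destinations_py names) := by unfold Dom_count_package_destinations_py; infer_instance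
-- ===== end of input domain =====

-- B replaces A's "intersect-and-subtract each group from the remaining set" loop by a
-- constant name→canonical-representative table and counts distinct canonical keys (objective: simpler).

-- ===== PORT A =====
-- module constant PACKAGE_DESTINATION_EQUIVALENCE_GROUPS of Source A
def pvGroups : List (PySem.Set String) :=
  [PySem.Set.ofList ["White & Black Desert", "Bahareya Oasis"],
   PySem.Set.ofList ["Cairo", "Giza"]]

def count_package_destinations_py (names : List String) : Int :=
  let remaining : PySem.Set String := PySem.Set.ofList (names.filter (fun n => n != ""))
  let st := pvGroups.foldl
    (fun (st : PySem.Set String × Int) group =>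
      if PySem.Set.inter st.1 group ≠ [] then (PySem.Set.diff st.1 group, st.2 + 1) else st)
    (remaining, 0)
  st.2 + PySem.Set.len st.1

-- ===== PORT B =====
-- module constant _CANON of Source B
def pvCanon : PySem.Dict String String :=
  PySem.Dict.ofList
    [("White & Black Desert", "White & Black Desert"),
     ("Bahareya Oasis", "White & Black Desert"),
     ("Cairo", "Cairo"),
     ("Giza", "Cairo")]

def count_package_destinations_py_alt (names : List String) : Int :=
  PySem.Set.len (PySem.Set.ofList
    ((names.filter (fun n => n != "")).map (fun name => pvCanon.getD name name)))

-- ===== PRECONDITION & SPEC =====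
def Spec_count_package_destinations_py (names : List String) (out : Int) : Prop := out = count_package_destinations_py_alt names
instance (names : List String) (out : Int) : Decidable (Spec_count_package_destinations_py names out) := by unfold Spec_count_package_destinations_py; infer_instance

-- ===== CLAIM (what is proved, stated in full; the proofs are below) =====
def Claim_equal_count_package_destinations_py : Prop := ∀ (names : List String), Dom_count_package_destinations_py names → Spec_count_package_destinations_py names (count_package_destinations_py names)

-- ===== LEMMAS AND PROOFS =====

-- the grouped names as plain lists, and the canonical map as a function
def pvG1 : List String := ["White & Black Desert", "Bahareya Oasis"]
def pvG2 : List String := ["Cairo", "Giza"]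
def pvAll : List String := ["White & Black Desert", "Bahareya Oasis", "Cairo", "Giza"]
def pvCanonF (n : String) : String := pvCanon.getD n n

lemma pvCanon_out {n : String} (h : n ∉ pvAll) : pvCanonF n = n := by
  apply PySem.Dict.getD_of_not_contains
  simp only [pvAll, List.mem_cons, List.not_mem_nil, or_false, not_or] at h
  obtain ⟨h1, h2, h3, h4⟩ := h
  simp [pvCanon, PySem.Dict.ofList, PySem.Dict.update, List.foldl,
    PySem.Dict.contains_insert, PySem.Dict.contains_empty, h1, h2, h3, h4]

lemma pvCanon_in_all {n : String} (h : n ∈ pvAll) : pvCanonF n ∈ pvAll := by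
  simp only [pvAll, List.mem_cons, List.not_mem_nil, or_false] at h ⊢
  rcases h with h | h | h | h <;> subst h <;> decide

lemma pvCanon_eq_r1_iff (n : String) : pvCanonF n = "White & Black Desert" ↔ n ∈ pvG1 := by
  by_cases h : n ∈ pvAll
  · simp only [pvAll, List.mem_cons, List.not_mem_nil, or_false] at h
    rcases h with h | h | h | h <;> subst h <;> simp [pvG1] <;> decide
  · rw [pvCanon_out h]
    constructor
    · intro he; exact absurd (he ▸ h) (by decide)
    · intro hm; exact absurd (by simp [pvAll, pvG1] at hm ⊢; tauto) h

lemma pvCanon_eq_r2_iff (n : String) : pvCanonF n = "Cairo" ↔ n ∈ pvG2 := by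
  by_cases h : n ∈ pvAll
  · simp only [pvAll, List.mem_cons, List.not_mem_nil, or_false] at h
    rcases h with h | h | h | h <;> subst h <;> simp [pvG2] <;> decide
  · rw [pvCanon_out h]
    constructor
    · intro he; exact absurd (he ▸ h) (by decide)
    · intro hm; exact absurd (by simp [pvAll, pvG2] at hm ⊢; tauto) h

lemma pvCanon_eq_out_iff {x : String} (hx : x ∉ pvAll) (n : String) : pvCanonF n = x ↔ n = x := by
  by_cases h : n ∈ pvAll
  · constructor
    · intro he; exact absurd (he ▸ pvCanon_in_all h) hx
    · intro he; subst he; exact absurd h hx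
  · rw [pvCanon_out h]

-- set image commutes with dedup
lemma pvOfList_map_ofList (l : List String) (f : String → String) :
    PySem.Set.ofList ((PySem.Set.ofList l).map f) = PySem.Set.ofList (l.map f) := by
  induction l using List.reverseRecOn with
  | nil => rfl
  | append_singleton xs x ih =>
    rw [PySem.Set.ofList_append_singleton, List.map_append, List.map_singleton,
      PySem.Set.ofList_append_singleton, PySem.Set.add_eq_ite]
    by_cases hx : x ∈ PySem.Set.ofList xs
    · rw [if_pos hx, ih, PySem.Set.add_of_mem]
      rw [PySem.Set.mem_ofList]
      rw [PySem.Set.mem_ofList] at hx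
      exact List.mem_map_of_mem hx
    · rw [if_neg hx, List.map_append, List.map_singleton,
        PySem.Set.ofList_append_singleton, ih]

-- length of a discard on a duplicate-free set
lemma pvLen_discard (s : List String) (hs : s.Nodup) (x : String) :
    ((PySem.Set.discard s x).length : Int) = (s.length : Int) - (if x ∈ s then 1 else 0) := by
  simp only [PySem.Set.discard]
  induction s with
  | nil => simp
  | cons a t ih =>
    obtain ⟨hat, ht⟩ := List.nodup_cons.mp hs
    rw [List.filter_cons]
    by_cases hax : a = x
    · subst hax
      simp only [beq_self_eq_true, Bool.not_true, Bool.false_eq_true, if_false]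
      rw [ih ht, if_neg hat, if_pos List.mem_cons_self]
      simp only [List.length_cons]
      push_cast
      ring
    · have hcond : (!(a == x)) = true := by simp [hax]
      simp only [hcond, if_true, List.length_cons]
      by_cases hxt : x ∈ t
      · rw [if_pos (List.mem_cons.mpr (Or.inr hxt))]
        push_cast
        rw [ih ht, if_pos hxt]
        ring
      · have hxc : x ∉ a :: t := by
          rw [List.mem_cons]; rintro (h | h); exact hax h.symm; exact hxt h
        rw [if_neg hxc]
        push_cast
        rw [ih ht, if_neg hxt]
        ring

-- disjointness / coverage facts about the literal groups
lemma pvG1_not_G2 {n : String} (h : n ∈ pvG1) : n ∉ pvG2 := by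
  simp only [pvG1, List.mem_cons, List.not_mem_nil, or_false] at h
  rcases h with h | h <;> subst h <;> decide
lemma pvG2_not_G1 {n : String} (h : n ∈ pvG2) : n ∉ pvG1 := by
  simp only [pvG2, List.mem_cons, List.not_mem_nil, or_false] at h
  rcases h with h | h <;> subst h <;> decide
lemma pvAll_iff (n : String) : n ∈ pvAll ↔ n ∈ pvG1 ∨ n ∈ pvG2 := by
  simp [pvAll, pvG1, pvG2, or_assoc]

-- core counting lemma for B's side
lemma pvCount_core (S : List String) (hS : S.Nodup) :
    PySem.Set.len (PySem.Set.ofList (S.map pvCanonF)) =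
      (if ∃ n ∈ S, n ∈ pvG1 then (1:Int) else 0) + (if ∃ n ∈ S, n ∈ pvG2 then (1:Int) else 0)
        + ((S.filter (fun n => !(pvAll.contains n))).length : Int) := by
  induction S with
  | nil => simp [PySem.Set.len, PySem.Set.ofList]
  | cons x rest ih =>
    obtain ⟨hxr, hr⟩ := List.nodup_cons.mp hS
    have hlen : PySem.Set.len (PySem.Set.ofList ((x :: rest).map pvCanonF)) =
        1 + PySem.Set.len (PySem.Set.ofList (rest.map pvCanonF)) -
          (if pvCanonF x ∈ PySem.Set.ofList (rest.map pvCanonF) then 1 else 0) := by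
      rw [List.map_cons, PySem.Set.ofList_cons]
      simp only [PySem.Set.len, List.length_cons]
      push_cast
      rw [pvLen_discard _ (PySem.Set.nodup_ofList _)]
      ring
    have hmem : (pvCanonF x ∈ PySem.Set.ofList (rest.map pvCanonF)) ↔
        ∃ n ∈ rest, pvCanonF n = pvCanonF x := by
      rw [PySem.Set.mem_ofList, List.mem_map]
    rw [hlen, ih hr]
    by_cases hx1 : x ∈ pvG1
    · have hc : pvCanonF x = "White & Black Desert" := (pvCanon_eq_r1_iff x).mpr hx1
      have hx2 : x ∉ pvG2 := pvG1_not_G2 hx1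
      have hxall : x ∈ pvAll := (pvAll_iff x).mpr (Or.inl hx1)
      have hmem' : (pvCanonF x ∈ PySem.Set.ofList (rest.map pvCanonF)) ↔ ∃ n ∈ rest, n ∈ pvG1 := by
        rw [hmem]
        constructor
        · rintro ⟨n, hn, he⟩; exact ⟨n, hn, (pvCanon_eq_r1_iff n).mp (he.trans hc)⟩
        · rintro ⟨n, hn, he⟩; exact ⟨n, hn, ((pvCanon_eq_r1_iff n).mpr he).trans hc.symm⟩
      have he1 : (∃ n ∈ x :: rest, n ∈ pvG1) := ⟨x, List.mem_cons_self, hx1⟩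
      have he2 : (∃ n ∈ x :: rest, n ∈ pvG2) ↔ ∃ n ∈ rest, n ∈ pvG2 := by
        simp only [List.mem_cons]
        constructor
        · rintro ⟨n, rfl | hn, h2⟩
          · exact absurd h2 hx2
          · exact ⟨n, hn, h2⟩
        · rintro ⟨n, hn, h2⟩; exact ⟨n, Or.inr hn, h2⟩
      have hfil : (x :: rest).filter (fun n => !(pvAll.contains n)) =
          rest.filter (fun n => !(pvAll.contains n)) := by
        have hcx : pvAll.contains x = true := by
          rw [List.contains_iff_mem]; exact hxall
        rw [List.filter_cons, hcx]
        simp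
      rw [hfil, if_pos he1]
      simp only [he2]
      by_cases hr1 : ∃ n ∈ rest, n ∈ pvG1
      · rw [if_pos (hmem'.mpr hr1), if_pos hr1]; ring
      · rw [if_neg (fun h => hr1 (hmem'.mp h)), if_neg hr1]; ring
    by_cases hx2 : x ∈ pvG2
    · have hc : pvCanonF x = "Cairo" := (pvCanon_eq_r2_iff x).mpr hx2
      have hxall : x ∈ pvAll := (pvAll_iff x).mpr (Or.inr hx2)
      have hmem' : (pvCanonF x ∈ PySem.Set.ofList (rest.map pvCanonF)) ↔ ∃ n ∈ rest, n ∈ pvG2 := by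
        rw [hmem]
        constructor
        · rintro ⟨n, hn, he⟩; exact ⟨n, hn, (pvCanon_eq_r2_iff n).mp (he.trans hc)⟩
        · rintro ⟨n, hn, he⟩; exact ⟨n, hn, ((pvCanon_eq_r2_iff n).mpr he).trans hc.symm⟩
      have he2 : (∃ n ∈ x :: rest, n ∈ pvG2) := ⟨x, List.mem_cons_self, hx2⟩
      have he1 : (∃ n ∈ x :: rest, n ∈ pvG1) ↔ ∃ n ∈ rest, n ∈ pvG1 := by
        simp only [List.mem_cons]
        constructor
        · rintro ⟨n, rfl | hn, h1⟩
          · exact absurd h1 hx1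
          · exact ⟨n, hn, h1⟩
        · rintro ⟨n, hn, h1⟩; exact ⟨n, Or.inr hn, h1⟩
      have hfil : (x :: rest).filter (fun n => !(pvAll.contains n)) =
          rest.filter (fun n => !(pvAll.contains n)) := by
        have hcx : pvAll.contains x = true := by
          rw [List.contains_iff_mem]; exact hxall
        rw [List.filter_cons, hcx]
        simp
      rw [hfil, if_pos he2]
      simp only [he1]
      by_cases hr2 : ∃ n ∈ rest, n ∈ pvG2
      · rw [if_pos (hmem'.mpr hr2), if_pos hr2]; ring
      · rw [if_neg (fun h => hr2 (hmem'.mp h)), if_neg hr2]; ring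
    · -- x outside both groups
      have hxall : x ∉ pvAll := fun h => by
        rcases (pvAll_iff x).mp h with h | h
        · exact hx1 h
        · exact hx2 h
      have hc : pvCanonF x = x := pvCanon_out hxall
      have hmem' : ¬ (pvCanonF x ∈ PySem.Set.ofList (rest.map pvCanonF)) := by
        rw [hmem]
        rintro ⟨n, hn, he⟩
        have : n = x := (pvCanon_eq_out_iff hxall n).mp (he.trans hc)
        exact hxr (this ▸ hn)
      have he1 : (∃ n ∈ x :: rest, n ∈ pvG1) ↔ ∃ n ∈ rest, n ∈ pvG1 := by
        simp only [List.mem_cons]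
        constructor
        · rintro ⟨n, rfl | hn, h1⟩
          · exact absurd h1 hx1
          · exact ⟨n, hn, h1⟩
        · rintro ⟨n, hn, h1⟩; exact ⟨n, Or.inr hn, h1⟩
      have he2 : (∃ n ∈ x :: rest, n ∈ pvG2) ↔ ∃ n ∈ rest, n ∈ pvG2 := by
        simp only [List.mem_cons]
        constructor
        · rintro ⟨n, rfl | hn, h2⟩
          · exact absurd h2 hx2
          · exact ⟨n, hn, h2⟩
        · rintro ⟨n, hn, h2⟩; exact ⟨n, Or.inr hn, h2⟩
      have hfil : (x :: rest).filter (fun n => !(pvAll.contains n)) =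
          x :: rest.filter (fun n => !(pvAll.contains n)) := by
        have hcx : pvAll.contains x = false := by
          rw [← Bool.not_eq_true, List.contains_iff_mem]
          exact hxall
        rw [List.filter_cons, hcx]
        simp
      rw [hfil, if_neg hmem']
      simp only [he1, he2]
      simp only [List.length_cons]
      push_cast
      ring

-- nonemptiness of an intersection is an existential
lemma pvInter_ne_nil (S G : List String) :
    PySem.Set.inter S G ≠ [] ↔ ∃ n ∈ S, n ∈ G := by
  rw [Ne, List.eq_nil_iff_forall_not_mem]
  push_neg
  constructor
  · rintro ⟨n, hn⟩
    rw [PySem.Set.mem_inter] at hn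
    exact ⟨n, hn.1, hn.2⟩
  · rintro ⟨n, hn, hg⟩
    refine ⟨n, ?_⟩
    rw [PySem.Set.mem_inter]
    exact ⟨hn, hg⟩

-- diff is a filter
lemma pvDiff_filter (S G : List String) :
    PySem.Set.diff S G = S.filter (fun n => !(G.contains n)) := rfl

-- splitting the "outside every group" filter into the two group filters
lemma pvFilter_split (l : List String) :
    (l.filter (fun n => !(pvG1.contains n))).filter (fun n => !(pvG2.contains n)) =
      l.filter (fun n => !(pvAll.contains n)) := by
  rw [List.filter_filter]
  apply List.filter_congr
  intro n _
  simp only [pvG1, pvG2, pvAll, List.contains_cons, List.contains_nil, Bool.or_false,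
    Bool.not_or]
  cases n == "White & Black Desert" <;> cases n == "Bahareya Oasis" <;>
    cases n == "Cairo" <;> cases n == "Giza" <;> rfl

-- closed form of A's group loop
lemma pvA_closed (S : PySem.Set String) :
    (pvGroups.foldl
      (fun (st : PySem.Set String × Int) group =>
        if PySem.Set.inter st.1 group ≠ [] then (PySem.Set.diff st.1 group, st.2 + 1) else st)
      (S, 0)).2 +
      PySem.Set.len (pvGroups.foldl
        (fun (st : PySem.Set String × Int) group =>
          if PySem.Set.inter st.1 group ≠ [] then (PySem.Set.diff st.1 group, st.2 + 1) else st)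
        (S, 0)).1 =
      (if ∃ n ∈ S, n ∈ pvG1 then (1:Int) else 0) + (if ∃ n ∈ S, n ∈ pvG2 then (1:Int) else 0)
        + ((S.filter (fun n => !(pvAll.contains n))).length : Int) := by
  have hg1 : PySem.Set.ofList ["White & Black Desert", "Bahareya Oasis"] = pvG1 := by decide
  have hg2 : PySem.Set.ofList ["Cairo", "Giza"] = pvG2 := by decide
  simp only [pvGroups, List.foldl, hg1, hg2]
  by_cases e1 : ∃ n ∈ S, n ∈ pvG1
  · rw [if_pos ((pvInter_ne_nil S pvG1).mpr e1)]
    have e2iff : (PySem.Set.inter (PySem.Set.diff S pvG1) pvG2 ≠ []) ↔ ∃ n ∈ S, n ∈ pvG2 := by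
      rw [pvInter_ne_nil]
      constructor
      · rintro ⟨n, hn, h2⟩
        rw [PySem.Set.mem_diff] at hn
        exact ⟨n, hn.1, h2⟩
      · rintro ⟨n, hn, h2⟩
        refine ⟨n, ?_, h2⟩
        rw [PySem.Set.mem_diff]
        exact ⟨hn, pvG2_not_G1 h2⟩
    by_cases e2 : ∃ n ∈ S, n ∈ pvG2
    · rw [if_pos (e2iff.mpr e2), if_pos e1, if_pos e2]
      rw [pvDiff_filter, pvDiff_filter, pvFilter_split]
      simp only [PySem.Set.len]
      ring
    · rw [if_neg (fun h => e2 (e2iff.mp h)), if_pos e1, if_neg e2]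
      have hf2 : (S.filter (fun n => !(pvG1.contains n))).filter (fun n => !(pvG2.contains n)) =
          S.filter (fun n => !(pvG1.contains n)) := by
        apply List.filter_eq_self.mpr
        intro n hn
        have hff : pvG2.contains n = false := by
          rw [← Bool.not_eq_true, List.contains_iff_mem]
          exact fun h2 => e2 ⟨n, List.mem_of_mem_filter hn, h2⟩
        rw [hff]
        rfl
      rw [← pvFilter_split, hf2, pvDiff_filter]
      simp only [PySem.Set.len]
      ring
  · rw [if_neg (fun h => e1 ((pvInter_ne_nil S pvG1).mp h))]
    have hd1 : S.filter (fun n => !(pvG1.contains n)) = S := by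
      apply List.filter_eq_self.mpr
      intro n hn
      have hff : pvG1.contains n = false := by
        rw [← Bool.not_eq_true, List.contains_iff_mem]
        exact fun h1 => e1 ⟨n, hn, h1⟩
      rw [hff]
      rfl
    by_cases e2 : ∃ n ∈ S, n ∈ pvG2
    · rw [if_pos ((pvInter_ne_nil S pvG2).mpr e2), if_neg e1, if_pos e2]
      rw [← pvFilter_split, hd1, pvDiff_filter]
      simp only [PySem.Set.len]
    · rw [if_neg (fun h => e2 ((pvInter_ne_nil S pvG2).mp h)), if_neg e1, if_neg e2]
      have hd2 : S.filter (fun n => !(pvG2.contains n)) = S := by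
        apply List.filter_eq_self.mpr
        intro n hn
        have hff : pvG2.contains n = false := by
          rw [← Bool.not_eq_true, List.contains_iff_mem]
          exact fun h2 => e2 ⟨n, hn, h2⟩
        rw [hff]
        rfl
      rw [← pvFilter_split, hd1, hd2]
      simp only [PySem.Set.len]
      ring

-- ===== VERDICT (by name: the statement is the Claim_ definition above) =====
theorem count_package_destinations_py_spec : Claim_equal_count_package_destinations_py := by
  intro names _
  unfold Spec_count_package_destinations_py count_package_destinations_py count_package_destinations_py_alt
  rw [show (fun name => pvCanon.getD name name) = pvCanonF from rfl,
    ← pvOfList_map_ofList, pvCount_core _ (PySem.Set.nodup_ofList _)]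
  exact pvA_closed _
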